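-- pv_equiv track=rewrite | github.com/chambost/competitions | uqcs_codejam/2021/010_the_chart_of_accounts.py | solve
-- ===== SOURCE A (Python) =====
-- def solve(table):
--     columns = zip(*table)
--     answer = []
--     for c in columns :
--         differences = [t - s for s,t in zip(c,c[1:])]
--         if all(d == 0 for d in differences) :
--             answer.append('E')
--         elif all(d < 0 for d in differences) :
--             answer.append('D')
--         elif all(d > 0 for d in differences) :
--             answer.append('A')
--         else :
--             answer.append('-')
--     return answer
-- ===== SOURCE B (Python) =====
-- def solve(table):
--     answer = []
--     for col in zip(*table):
--         c = list(col)
--         distinct = len(set(c)) == len(c)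
--         if len(set(c)) <= 1:
--             answer.append('E')
--         elif c == sorted(c) and distinct:
--             answer.append('A')
--         elif c == sorted(c, reverse=True) and distinct:
--             answer.append('D')
--         else:
--             answer.append('-')
--     return answer
-- ===== Notes on version B (the rewrite author's own statement) =====
-- stated objective: idiomatic
-- what changed: B drops the adjacent-differences analysis entirely: each column is classified by comparing it with its sorted and reverse-sorted versions and by its distinct-value count via set() ('E' iff len(set(c))<=1, 'A'/'D' iff the column equals sorted(c)/sorted(c,reverse=True) with all values distinct).
import Mathlib
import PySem

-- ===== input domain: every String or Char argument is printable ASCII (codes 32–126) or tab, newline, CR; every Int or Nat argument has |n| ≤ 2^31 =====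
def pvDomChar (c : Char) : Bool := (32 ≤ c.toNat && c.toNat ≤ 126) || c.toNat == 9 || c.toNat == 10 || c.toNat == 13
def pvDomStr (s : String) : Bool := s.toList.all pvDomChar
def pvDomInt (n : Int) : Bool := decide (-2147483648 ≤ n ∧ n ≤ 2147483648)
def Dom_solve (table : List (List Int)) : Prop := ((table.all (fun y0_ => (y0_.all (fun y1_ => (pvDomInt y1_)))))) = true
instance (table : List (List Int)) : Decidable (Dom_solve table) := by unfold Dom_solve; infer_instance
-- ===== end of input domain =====

-- B replaces the adjacent-differences test by a sort-and-compare classification: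
-- a column is 'E' iff it has at most one distinct value, 'A' iff it equals its sorted
-- version with all values distinct, 'D' likewise against the reverse sort (objective: idiomatic).

-- Python's zip(*table): take heads while every remaining row is nonempty (shared transpose
-- helper; both Pythons iterate 'zip(*table)' identically). Recurses structurally on row 0.
def zipGo (r : List Int) (rs : List (List Int)) : List (List Int) :=
  match r with
  | [] => []
  | x :: xs =>
      if rs.all (fun q => !q.isEmpty) then
        (x :: rs.map (fun q => q.headD 0)) :: zipGo xs (rs.map List.tail)
      else []

def zipStar (table : List (List Int)) : List (List Int) :=
  match table with
  | [] => []
  | r :: rs => zipGo r rs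

-- ===== PORT A =====
-- per column: differences = [t - s ...]; all==0 → E, all<0 → D, all>0 → A, else '-'
def classifyA (c : List Int) : String :=
  let differences := (c.zip c.tail).map (fun p => p.2 - p.1)
  if differences.all (fun d => d == 0) then "E"
  else if differences.all (fun d => decide (d < 0)) then "D"
  else if differences.all (fun d => decide (0 < d)) then "A"
  else "-"

def solve (table : List (List Int)) : List String :=
  (zipStar table).map classifyA

-- ===== PORT B =====
-- per column: len(set(c)) <= 1 → E; c == sorted(c) and distinct → A;
-- c == sorted(c, reverse=True) and distinct → D; else '-'
def classifyB (c : List Int) : String :=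
  let distinct := (PySem.Set.ofList c).length == c.length
  if (PySem.Set.ofList c).length ≤ 1 then "E"
  else if (c == PySem.List.sorted c (fun x => x) false) && distinct then "A"
  else if (c == PySem.List.sorted c (fun x => x) true) && distinct then "D"
  else "-"

def solve_alt (table : List (List Int)) : List String :=
  (zipStar table).map classifyB

-- ===== PRECONDITION & SPEC =====
def Spec_solve (table : List (List Int)) (out : List String) : Prop := out = solve_alt table
instance (table : List (List Int)) (out : List String) : Decidable (Spec_solve table out) := by unfold Spec_solve; infer_instance

-- ===== CLAIM =====
def Claim_equal_solve : Prop := ∀ (table : List (List Int)), Dom_solve table → Spec_solve table (solve table)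

-- ===== LEMMAS AND PROOFS =====

-- the distinct-value count len(set(c)) is the Finset cardinality of c
lemma ofList_length_eq_card (c : List Int) :
    (PySem.Set.ofList c).length = c.toFinset.card := by
  have hnd := PySem.Set.nodup_ofList c
  have : (PySem.Set.ofList c).toFinset = c.toFinset := by
    ext x; simp [PySem.Set.mem_ofList]
  rw [← this, List.toFinset_card_of_nodup hnd]

lemma distinct_iff (c : List Int) :
    (PySem.Set.ofList c).length = c.length ↔ c.Nodup := by
  rw [ofList_length_eq_card, List.card_toFinset]
  constructor
  · intro h
    have hs : c.dedup.Sublist c := c.dedup_sublist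
    have := hs.eq_of_length h
    rw [← this]; exact c.nodup_dedup
  · intro h; rw [List.dedup_eq_self.2 h]

lemma atmostone_iff (c : List Int) :
    (PySem.Set.ofList c).length ≤ 1 ↔ ∀ a ∈ c, ∀ b ∈ c, a = b := by
  rw [ofList_length_eq_card, Finset.card_le_one]
  simp

-- the adjacent-pair all-test of port A is a chain condition
lemma all_zip_tail (p : Int → Int → Bool) :
    ∀ c : List Int, (((c.zip c.tail).all fun q => p q.1 q.2) = true ↔ c.IsChain (fun a b => p a b = true))
  | [] => by simp
  | [x] => by simp
  | x :: y :: t => by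
      have ih := all_zip_tail p (y :: t)
      simp only [List.tail_cons, List.zip_cons_cons, List.all_cons, List.isChain_cons_cons,
        Bool.and_eq_true] at *
      exact and_congr Iff.rfl ih

lemma pairwise_eq_iff (c : List Int) :
    c.Pairwise (fun a b : Int => a = b) ↔ ∀ a ∈ c, ∀ b ∈ c, a = b := by
  induction c with
  | nil => simp
  | cons x t ih =>
      simp only [List.pairwise_cons, List.mem_cons, ih]
      constructor
      · rintro ⟨h1, h2⟩ a (rfl | ha) b (rfl | hb)
        · rfl
        · exact h1 b hb
        · exact (h1 a ha).symm
        · exact h2 a ha b hb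
      · intro h
        exact ⟨fun b hb => h x (Or.inl rfl) b (Or.inr hb),
               fun a ha b hb => h a (Or.inr ha) b (Or.inr hb)⟩

lemma adjE (c : List Int) :
    (((c.zip c.tail).all fun p => p.2 - p.1 == 0) = true) ↔ ∀ a ∈ c, ∀ b ∈ c, a = b := by
  have h := all_zip_tail (fun a b => b - a == 0) c
  have hrel : (fun a b : Int => ((b - a == 0) = true)) = (fun a b : Int => a = b) := by
    funext a b; apply propext; rw [beq_iff_eq]; omega
  rw [hrel] at h
  exact h.trans ((@List.isChain_iff_pairwise _ _ _ ⟨fun h1 h2 => h1.trans h2⟩).trans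
    (pairwise_eq_iff c))

lemma adjD (c : List Int) :
    (((c.zip c.tail).all fun p => decide (p.2 - p.1 < 0)) = true) ↔
      c.Pairwise (fun a b : Int => b < a) := by
  have h := all_zip_tail (fun a b => decide (b - a < 0)) c
  have hrel : (fun a b : Int => (decide (b - a < 0) = true)) = (fun a b : Int => b < a) := by
    funext a b; apply propext; rw [decide_eq_true_eq]; omega
  rw [hrel] at h
  exact h.trans (@List.isChain_iff_pairwise _ _ _ ⟨fun h1 h2 => h2.trans h1⟩)

lemma adjA (c : List Int) :
    (((c.zip c.tail).all fun p => decide (0 < p.2 - p.1)) = true) ↔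
      c.Pairwise (fun a b : Int => a < b) := by
  have h := all_zip_tail (fun a b => decide (0 < b - a)) c
  have hrel : (fun a b : Int => (decide (0 < b - a) = true)) = (fun a b : Int => a < b) := by
    funext a b; apply propext; rw [decide_eq_true_eq]; omega
  rw [hrel] at h
  exact h.trans (@List.isChain_iff_pairwise _ _ _ ⟨fun h1 h2 => h1.trans h2⟩)

lemma asc_iff (c : List Int) :
    c.Pairwise (fun a b : Int => a < b) ↔
      (PySem.List.sorted c (fun x => x) false = c ∧ c.Nodup) := by
  constructor
  · intro h
    exact ⟨PySem.List.sorted_eq_of_perm_of_pairwise_lt c c (fun x => x) (List.Perm.refl c) h,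
           h.imp ne_of_lt⟩
  · rintro ⟨hs, hnd⟩
    have hle : c.Pairwise (fun a b : Int => a ≤ b) := by
      have := PySem.List.sorted_pairwise c (fun x : Int => x)
      rwa [hs] at this
    exact (hle.and hnd).imp (fun h => lt_of_le_of_ne h.1 h.2)

lemma desc_iff (c : List Int) :
    c.Pairwise (fun a b : Int => b < a) ↔
      (PySem.List.sorted c (fun x => x) true = c ∧ c.Nodup) := by
  constructor
  · intro h
    exact ⟨PySem.List.sorted_rev_eq_of_perm_of_pairwise_gt c c (fun x => x) (List.Perm.refl c) h,
           h.imp ne_of_gt⟩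
  · rintro ⟨hs, hnd⟩
    have hge : c.Pairwise (fun a b : Int => b ≤ a) := by
      have := PySem.List.sorted_pairwise_rev c (fun x : Int => x)
      rwa [hs] at this
    exact (hge.and hnd).imp (fun h => lt_of_le_of_ne h.1 h.2.symm)

lemma not_both (c : List Int) (hA : c.Pairwise (fun a b : Int => a < b))
    (hD : c.Pairwise (fun a b : Int => b < a)) : ∀ a ∈ c, ∀ b ∈ c, a = b := by
  match c with
  | [] => simp
  | [x] => simp
  | x :: y :: t =>
      have h1 : x < y := List.rel_of_pairwise_cons hA (List.mem_cons_self)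
      have h2 : y < x := List.rel_of_pairwise_cons hD (List.mem_cons_self)
      omega

lemma bcondA (c : List Int) :
    (((c == PySem.List.sorted c (fun x => x) false) &&
        ((PySem.Set.ofList c).length == c.length)) = true) ↔
      c.Pairwise (fun a b : Int => a < b) := by
  rw [asc_iff]
  simp only [Bool.and_eq_true, beq_iff_eq]
  rw [distinct_iff]
  exact and_congr_left (fun _ => eq_comm)

lemma bcondD (c : List Int) :
    (((c == PySem.List.sorted c (fun x => x) true) &&
        ((PySem.Set.ofList c).length == c.length)) = true) ↔
      c.Pairwise (fun a b : Int => b < a) := by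
  rw [desc_iff]
  simp only [Bool.and_eq_true, beq_iff_eq]
  rw [distinct_iff]
  exact and_congr_left (fun _ => eq_comm)

lemma classify_eq (c : List Int) : classifyA c = classifyB c := by
  unfold classifyA classifyB
  simp only [List.all_map, Function.comp_def]
  by_cases he : ∀ a ∈ c, ∀ b ∈ c, a = b
  · rw [if_pos ((adjE c).2 he), if_pos ((atmostone_iff c).2 he)]
  · rw [if_neg (fun h => he ((adjE c).1 h)), if_neg (fun h => he ((atmostone_iff c).1 h))]
    by_cases hd : c.Pairwise (fun a b : Int => b < a)
    · rw [if_pos ((adjD c).2 hd),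
        if_neg (fun h => he (not_both c ((bcondA c).1 h) hd)),
        if_pos ((bcondD c).2 hd)]
    · rw [if_neg (fun h => hd ((adjD c).1 h))]
      by_cases ha : c.Pairwise (fun a b : Int => a < b)
      · rw [if_pos ((adjA c).2 ha), if_pos ((bcondA c).2 ha)]
      · rw [if_neg (fun h => ha ((adjA c).1 h)),
          if_neg (fun h => ha ((bcondA c).1 h)),
          if_neg (fun h => hd ((bcondD c).1 h))]

-- ===== VERDICT =====
theorem solve_spec : Claim_equal_solve := by
  intro table _
  show solve table = solve_alt table
  unfold solve solve_alt
  exact List.map_congr_left (fun c _ => classify_eq c)
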